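-- pv_equiv track=rewrite | github.com/HaotianZhangAI4Science/FragGen | utils/sample_utils.py | select_data_with_limited_smi
-- ===== SOURCE A (Python) =====
-- from collections import defaultdict
--
-- def select_data_with_limited_smi(data_list, smi_tolorance=2):
--     smiles_count = defaultdict(int)
--     limited_data_list = []
--
--     for data in data_list:
--         smiles = data['smiles']
--         if smiles_count[smiles] < smi_tolorance:
--             limited_data_list.append(data)
--             smiles_count[smiles] += 1
--
--     return limited_data_list
-- ===== SOURCE B (Python) =====
-- def select_data_with_limited_smi(data_list, smi_tolorance=2):
--     # stateless: keep item i iff its smiles occurs fewer than smi_tolorance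
--     # times among the earlier items data_list[:i]
--     return [d for i, d in enumerate(data_list)
--             if sum(1 for e in data_list[:i] if e['smiles'] == d['smiles']) < smi_tolorance]
-- ===== Notes on version B (the rewrite author's own statement) =====
-- stated objective: alternative
-- what changed: Replaced A's single stateful pass with a counter dict by a stateless filter comprehension that keeps item i iff its smiles value occurs fewer than smi_tolorance times in the prefix data_list[:i].
import Mathlib
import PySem

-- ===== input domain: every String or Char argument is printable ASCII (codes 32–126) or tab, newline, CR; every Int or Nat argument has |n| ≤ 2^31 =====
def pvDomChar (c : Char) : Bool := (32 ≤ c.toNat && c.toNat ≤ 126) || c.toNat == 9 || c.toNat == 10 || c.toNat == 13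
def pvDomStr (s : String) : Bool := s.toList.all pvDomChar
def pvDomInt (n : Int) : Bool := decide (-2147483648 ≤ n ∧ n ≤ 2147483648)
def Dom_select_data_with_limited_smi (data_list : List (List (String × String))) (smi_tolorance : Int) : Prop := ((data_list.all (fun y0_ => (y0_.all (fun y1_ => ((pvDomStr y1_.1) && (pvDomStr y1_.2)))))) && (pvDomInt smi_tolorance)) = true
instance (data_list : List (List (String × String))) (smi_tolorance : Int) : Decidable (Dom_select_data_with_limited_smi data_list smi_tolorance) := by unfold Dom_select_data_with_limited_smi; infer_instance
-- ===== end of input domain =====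

-- B replaces A's stateful counter-dict pass by a stateless prefix-count filter; objective: alternative (same output, not faster).


-- d['smiles'] (first match); the .getD "" default is reached only outside Pre_ (Python raises KeyError there)
def pvSmi (d : List (String × String)) : String := ((PySem.Dict.mk d).get? "smiles").getD ""

-- ===== PORT A =====
-- the defaultdict read smiles_count[smiles] is modelled value-faithfully by getD 0
-- (the implicit insertion of the default 0 is unobservable in the returned list)
def select_data_with_limited_smi (data_list : List (List (String × String))) (smi_tolorance : Int) : List (List (String × String)) :=
  (data_list.foldl
    (fun (st : PySem.Dict String Int × List (List (String × String))) data =>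
      let smiles := pvSmi data
      let c := st.1.getD smiles 0
      if c < smi_tolorance then (st.1.insert smiles (c + 1), st.2 ++ [data]) else (st.1, st.2))
    (PySem.Dict.empty, [])).2

-- ===== PORT B =====
-- the 0/1 generator sum over data_list[:i] is List.countP on the slice
def select_data_with_limited_smi_alt (data_list : List (List (String × String))) (smi_tolorance : Int) : List (List (String × String)) :=
  ((PySem.List.enumerate data_list 0).filter
    (fun q => decide (((PySem.List.slice data_list none (some q.1)).countP
        (fun e => pvSmi e == pvSmi q.2) : Int) < smi_tolorance))).map (·.2)

-- ===== PRECONDITION & SPEC =====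
-- Pre_ excludes exactly the inputs where Python A raises KeyError: some element has no 'smiles' key.
def Pre_select_data_with_limited_smi (data_list : List (List (String × String))) (smi_tolorance : Int) : Prop :=
  ∀ d ∈ data_list, "smiles" ∈ d.map Prod.fst
instance (data_list : List (List (String × String))) (smi_tolorance : Int) : Decidable (Pre_select_data_with_limited_smi data_list smi_tolorance) := by unfold Pre_select_data_with_limited_smi; infer_instance
def pvWitness_select_data_with_limited_smi : (List (List (String × String))) × Int :=
  ([[("smiles", "CC")], [("smiles", "CC")], [("smiles", "O")], [("smiles", "CC")]], 2)

def Spec_select_data_with_limited_smi (data_list : List (List (String × String))) (smi_tolorance : Int) (out : List (List (String × String))) : Prop := out = select_data_with_limited_smi_alt data_list smi_tolorance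
instance (data_list : List (List (String × String))) (smi_tolorance : Int) (out : List (List (String × String))) : Decidable (Spec_select_data_with_limited_smi data_list smi_tolorance out) := by unfold Spec_select_data_with_limited_smi; infer_instance

-- ===== CLAIM (what is proved, stated in full; the proofs are below) =====
def Claim_equal_select_data_with_limited_smi : Prop := ∀ (data_list : List (List (String × String))) (smi_tolorance : Int), Dom_select_data_with_limited_smi data_list smi_tolorance → Pre_select_data_with_limited_smi data_list smi_tolorance → Spec_select_data_with_limited_smi data_list smi_tolorance (select_data_with_limited_smi data_list smi_tolorance)

-- ===== LEMMAS AND PROOFS =====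

-- common reference point: the selection described by "keep d iff its smiles occurs < k times in the prefix seen so far"
def pvBsel (k : Int) (p : List (List (String × String))) : List (List (String × String)) → List (List (String × String))
  | [] => []
  | d :: rest =>
    if ((p.countP (fun e => pvSmi e == pvSmi d) : Int)) < k then
      d :: pvBsel k (p ++ [d]) rest
    else pvBsel k (p ++ [d]) rest

-- A's loop: the dict invariantly stores min(prefix count, max k 0) per smiles
lemma pvA_inv (k : Int) :
    ∀ (rest p : List (List (String × String))) (dict : PySem.Dict String Int)
      (acc : List (List (String × String))),
      (∀ x : String, dict.getD x 0 = min ((p.countP (fun e => pvSmi e == x) : Int)) (max k 0)) →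
      (rest.foldl
        (fun (st : PySem.Dict String Int × List (List (String × String))) data =>
          let smiles := pvSmi data
          let c := st.1.getD smiles 0
          if c < k then (st.1.insert smiles (c + 1), st.2 ++ [data]) else (st.1, st.2))
        (dict, acc)).2 = acc ++ pvBsel k p rest := by
  intro rest
  induction rest with
  | nil => intro p dict acc h; simp [pvBsel]
  | cons d rest ih =>
    intro p dict acc h
    have hc := h (pvSmi d)
    have hcnt : (0 : Int) ≤ (p.countP (fun e => pvSmi e == pvSmi d) : Int) := Int.natCast_nonneg _
    have hsame : ((p ++ [d]).countP (fun e => pvSmi e == pvSmi d) : Int)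
        = (p.countP (fun e => pvSmi e == pvSmi d) : Int) + 1 := by
      simp [List.countP_append]
    have hother : ∀ x : String, x ≠ pvSmi d →
        (p ++ [d]).countP (fun e => pvSmi e == x) = p.countP (fun e => pvSmi e == x) := by
      intro x hx
      simp [List.countP_append]
      exact fun hh => hx hh.symm
    by_cases hlt : dict.getD (pvSmi d) 0 < k
    · have hlt' : ((p.countP (fun e => pvSmi e == pvSmi d) : Int)) < k := by omega
      simp only [List.foldl_cons, pvBsel, if_pos hlt, if_pos hlt']
      rw [ih (p ++ [d])]
      · simp
      · intro x
        rw [PySem.Dict.getD_insert]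
        by_cases hx : x = pvSmi d
        · rw [if_pos hx, hx, hsame]
          omega
        · rw [if_neg hx, h x, hother x hx]
    · have hge : ¬ ((p.countP (fun e => pvSmi e == pvSmi d) : Int)) < k := by omega
      simp only [List.foldl_cons, pvBsel, if_neg hlt, if_neg hge]
      rw [ih (p ++ [d])]
      intro x
      by_cases hx : x = pvSmi d
      · rw [hx, hsame, h (pvSmi d)]
        omega
      · rw [h x, hother x hx]

-- B's comprehension over a suffix, with the prefix already fixed, is pvBsel
lemma pvB_eq (k : Int) :
    ∀ (rest p : List (List (String × String))),
      ((PySem.List.enumerate rest ((p.length : Nat) : Int)).filter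
        (fun q => decide (((PySem.List.slice (p ++ rest) none (some q.1)).countP
            (fun e => pvSmi e == pvSmi q.2) : Int) < k))).map (·.2)
      = pvBsel k p rest := by
  intro rest
  induction rest with
  | nil => intro p; simp [PySem.List.enumerate_nil, pvBsel]
  | cons d rest ih =>
    intro p
    rw [PySem.List.enumerate_cons]
    have hslice : PySem.List.slice (p ++ d :: rest) none (some ((p.length : Nat) : Int)) = p := by
      rw [PySem.List.slice_to_natCast]
      simp
    have hassoc : p ++ d :: rest = (p ++ [d]) ++ rest := by simp
    have hlen : ((p.length : Nat) : Int) + 1 = (((p ++ [d]).length : Nat) : Int) := by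
      simp
    by_cases hlt : ((p.countP (fun e => pvSmi e == pvSmi d) : Int)) < k
    · rw [List.filter_cons_of_pos (by simpa [hslice] using hlt)]
      simp only [List.map_cons, pvBsel, if_pos hlt]
      rw [hlen, hassoc, ih (p ++ [d])]
    · rw [List.filter_cons_of_neg (by simpa [hslice] using hlt)]
      simp only [pvBsel, if_neg hlt]
      rw [hlen, hassoc, ih (p ++ [d])]

-- ===== VERDICT (by name: the statement is the Claim_ definition above) =====
theorem select_data_with_limited_smi_spec : Claim_equal_select_data_with_limited_smi := by
  intro data_list k _ _
  unfold Spec_select_data_with_limited_smi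
  unfold select_data_with_limited_smi select_data_with_limited_smi_alt
  rw [pvA_inv k data_list [] PySem.Dict.empty []
    (by intro x; simp [PySem.Dict.getD_empty])]
  have h := pvB_eq k data_list []
  simpa using h.symm
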